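-- pv_equiv track=rewrite | github.com/Dhliwayo6/Python-Practice | python_practice.py | prime_words
-- ===== SOURCE A (Python) =====
-- def prime_words(sentence):
--     def is_prime(n):
--         for i in range(2, n):
--             if n%i == 0:
--                 return False
--         return True
--
--     splitSentence = sentence.split()
--     new_sentence = []
--     for word in splitSentence:
--         if is_prime(len(word)):
--             new_sentence.append(word)
--     s = ' '.join(new_sentence)
--     new_sentence = s
--     return new_sentence
-- ===== SOURCE B (Python) =====
-- def prime_words(sentence):
--     def is_prime(n):
--         i = 2
--         while i * i <= n:
--             if n % i == 0:
--                 return False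
--             i += 1
--         return True
--     return ' '.join(w for w in sentence.split() if is_prime(len(w)))
-- ===== Notes on version B (the rewrite author's own statement) =====
-- stated objective: alternative
-- what changed: Trial division tests divisors only while i*i <= n (square-root bound) instead of over the whole range(2, n), and the filter/join is a single generator expression instead of an accumulator loop.
import Mathlib
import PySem

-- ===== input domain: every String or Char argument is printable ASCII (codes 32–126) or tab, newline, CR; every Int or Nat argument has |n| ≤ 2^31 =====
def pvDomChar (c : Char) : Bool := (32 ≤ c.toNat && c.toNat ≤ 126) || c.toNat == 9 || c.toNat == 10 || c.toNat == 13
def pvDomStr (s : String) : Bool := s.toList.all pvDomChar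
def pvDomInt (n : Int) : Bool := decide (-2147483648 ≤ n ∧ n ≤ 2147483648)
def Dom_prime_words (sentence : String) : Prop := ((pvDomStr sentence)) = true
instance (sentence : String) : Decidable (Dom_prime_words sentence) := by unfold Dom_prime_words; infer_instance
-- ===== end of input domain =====

-- B bounds the per-word trial division by i*i ≤ n instead of running over range(2, n); same results for every length (0 and 1 included).

-- ===== PORT A =====
-- A's inner is_prime: for i in range(2, n): if n % i == 0: return False; return True
def pvIsPrimeA (n : Int) : Bool :=
  (PySem.List.pyRange 2 n 1).all (fun i => !(PySem.Int.mod n i == 0))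

def prime_words (sentence : String) : String :=
  let splitSentence := PySem.Str.split₀ sentence
  let new_sentence : List String :=
    splitSentence.foldl (fun acc word => if pvIsPrimeA (PySem.Str.len word) then acc ++ [word] else acc) []
  PySem.Str.join " " new_sentence

-- ===== PORT B =====
-- B's while loop 'while i*i <= n: …'; the proof argument 1 ≤ i only justifies termination.
def pvIsPrimeBLoop (n : Int) (i : Int) (hi : 1 ≤ i) : Bool :=
  if _h : i * i ≤ n then
    if PySem.Int.mod n i == 0 then false
    else pvIsPrimeBLoop n (i + 1) (by omega)
  else true
termination_by (n + 1 - i).toNat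
decreasing_by
  have h1 : i ≤ i * i := le_mul_of_one_le_left (by omega) hi
  omega

def pvIsPrimeB (n : Int) : Bool := pvIsPrimeBLoop n 2 (by omega)

def prime_words_alt (sentence : String) : String :=
  PySem.Str.join " " ((PySem.Str.split₀ sentence).filter (fun w => pvIsPrimeB (PySem.Str.len w)))

-- ===== PRECONDITION & SPEC =====
def Spec_prime_words (sentence : String) (out : String) : Prop := out = prime_words_alt sentence
instance (sentence : String) (out : String) : Decidable (Spec_prime_words sentence out) := by unfold Spec_prime_words; infer_instance

-- ===== CLAIM (what is proved, stated in full; the proofs are below) =====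
def Claim_equal_prime_words : Prop := ∀ (sentence : String), Dom_prime_words sentence → Spec_prime_words sentence (prime_words sentence)

-- ===== LEMMAS AND PROOFS =====

lemma pvIsPrimeA_iff (n : Int) :
    pvIsPrimeA n = true ↔ ∀ j : Int, 2 ≤ j → j < n → ¬ j ∣ n := by
  unfold pvIsPrimeA
  rw [List.all_eq_true]
  constructor
  · intro h j h2 hlt hdvd
    have hm : j ∈ PySem.List.pyRange 2 n 1 := (PySem.List.mem_pyRange_one).2 ⟨h2, hlt⟩
    have := h j hm
    rw [← PySem.Int.mod_eq_zero_iff_dvd n j] at hdvd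
    simp [hdvd] at this
  · intro h j hm
    have hj := (PySem.List.mem_pyRange_one).1 hm
    have : ¬ j ∣ n := h j hj.1 hj.2
    rw [← PySem.Int.mod_eq_zero_iff_dvd n j] at this
    simpa using this

lemma pvIsPrimeBLoop_iff (n i : Int) (hi : 1 ≤ i) :
    pvIsPrimeBLoop n i hi = true ↔ ∀ j : Int, i ≤ j → j * j ≤ n → ¬ j ∣ n := by
  induction i, hi using pvIsPrimeBLoop.induct (n := n) with
  | case1 i hi h hm =>
    rw [pvIsPrimeBLoop]
    simp only [dif_pos h, if_pos hm]
    have hdvd : i ∣ n := (PySem.Int.mod_eq_zero_iff_dvd n i).1 (by simpa using hm)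
    constructor
    · intro hf; exact absurd hf (by simp)
    · intro hall; exact absurd hdvd (hall i le_rfl h)
  | case2 i hi h hm ih =>
    rw [pvIsPrimeBLoop]
    simp only [dif_pos h, if_neg hm]
    rw [ih]
    constructor
    · intro hall j hij hjj hdvd
      rcases lt_or_eq_of_le hij with hlt | heq
      · exact hall j (by omega) hjj hdvd
      · subst heq
        have hz : PySem.Int.mod n i = 0 := (PySem.Int.mod_eq_zero_iff_dvd n i).2 hdvd
        simp [hz] at hm
    · intro hall j hij hjj hdvd
      exact hall j (by omega) hjj hdvd
  | case3 i hi h =>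
    rw [pvIsPrimeBLoop]
    simp only [dif_neg h]
    constructor
    · intro _ j hij hjj hdvd
      have : i * i ≤ j * j := mul_le_mul hij hij (by omega) (by omega)
      omega
    · intro _; trivial

lemma pvPrime_key (n : Int) (hn : 0 ≤ n) :
    pvIsPrimeA n = pvIsPrimeB n := by
  have hA := pvIsPrimeA_iff n
  have hB := pvIsPrimeBLoop_iff n 2 (by omega)
  unfold pvIsPrimeB
  rw [Bool.eq_iff_iff, hA, hB]
  constructor
  · intro h j h2 hjj hdvd
    have hjn : j < n := by nlinarith
    exact h j h2 hjn hdvd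
  · intro h j h2 hjn hdvd
    rcases hdvd with ⟨k, hk⟩
    have hj0 : 0 < j := by omega
    have hk2 : 2 ≤ k := by nlinarith
    by_cases hjj : j * j ≤ n
    · exact h j h2 hjj ⟨k, hk⟩
    · have hkj : k < j := by nlinarith
      have hkk : k * k ≤ n := by nlinarith
      exact h k hk2 hkk ⟨j, by linarith [hk, mul_comm j k]⟩

lemma pvLen_nonneg (w : String) : 0 ≤ PySem.Str.len w := by
  simp [PySem.Str.len_eq]

-- ===== VERDICT (by name: the statement is the Claim_ definition above) =====
theorem prime_words_spec : Claim_equal_prime_words := by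
  intro sentence _
  unfold Spec_prime_words prime_words prime_words_alt
  simp only []
  rw [PySem.List.foldl_append_if_eq_filter]
  congr 1
  simp only [List.nil_append]
  apply List.filter_congr
  intro w _
  exact pvPrime_key (PySem.Str.len w) (pvLen_nonneg w)
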